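-- pv_equiv track=rewrite | github.com/tmunzer-AIDE/mist_automation | backend/app/utils/webhook_validator.py | validate_mist_webhook_type
-- ===== SOURCE A (Python) =====
-- from typing import Any, Dict, Optional, Tuple
--
-- MIST_WEBHOOK_TYPES = {
--     # Alarm webhooks
--     "alarm": [
--         "ap_offline",
--         "ap_online",
--         "switch_offline",
--         "switch_online",
--         "gateway_offline",
--         "gateway_online",
--         "ap_restarted",
--         "switch_restarted",
--         "gateway_restarted",
--         "ap_configured",
--         "switch_configured",
--         "gateway_configured",
--         "ap_disconnected",
--         "switch_disconnected",
--         "gateway_disconnected",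
--     ],
--
--     # Audit webhooks
--     "audit": [
--         "config_changed",
--         "site_config_changed",
--         "org_config_changed",
--         "device_config_changed",
--         "wlan_config_changed",
--         "network_config_changed",
--     ],
--
--     # Device events
--     "device-events": [
--         "device_claimed",
--         "device_unclaimed",
--         "device_assigned",
--         "device_unassigned",
--         "device_upgraded",
--     ],
--
--     # Client events
--     "client-join": [
--         "client_connected",
--         "client_disconnected",
--     ],
--
--     # Zone events
--     "zone": [
--         "zone_entered",
--         "zone_exited",
--     ],
--
--     # Asset events
--     "asset-raw": [
--         "asset_detected",
--     ],
-- }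
--
-- def validate_mist_webhook_type(webhook_type: str) -> Tuple[bool, Optional[str]]:
--     """
--     Validate Mist webhook type.
--
--     Args:
--         webhook_type: Webhook type to validate
--
--     Returns:
--         Tuple of (is_valid, error_message)
--
--     Example:
--         >>> valid, error = validate_mist_webhook_type("alarm")
--         >>> valid
--         True
--     """
--     if not webhook_type:
--         return False, "Webhook type is required"
--
--     # Check if it's a valid category
--     if webhook_type in MIST_WEBHOOK_TYPES:
--         return True, None
--
--     # Check if it's a specific event type
--     for category, events in MIST_WEBHOOK_TYPES.items():
--         if webhook_type in events:
--             return True, None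
--
--     return False, f"Invalid Mist webhook type: {webhook_type}"
-- ===== SOURCE B (Python) =====
-- from typing import Optional, Tuple
--
-- MIST_WEBHOOK_TYPES = {
--     "alarm": [
--         "ap_offline", "ap_online", "switch_offline", "switch_online",
--         "gateway_offline", "gateway_online", "ap_restarted", "switch_restarted",
--         "gateway_restarted", "ap_configured", "switch_configured",
--         "gateway_configured", "ap_disconnected", "switch_disconnected",
--         "gateway_disconnected",
--     ],
--     "audit": [
--         "config_changed", "site_config_changed", "org_config_changed",
--         "device_config_changed", "wlan_config_changed", "network_config_changed",
--     ],
--     "device-events": [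
--         "device_claimed", "device_unclaimed", "device_assigned",
--         "device_unassigned", "device_upgraded",
--     ],
--     "client-join": ["client_connected", "client_disconnected"],
--     "zone": ["zone_entered", "zone_exited"],
--     "asset-raw": ["asset_detected"],
-- }
--
-- # All valid tokens (category names plus every event), sorted once at module load;
-- # lookups are then a binary search instead of A's staged linear scans.
-- _SORTED_TOKENS = sorted(
--     set(MIST_WEBHOOK_TYPES) | {e for evs in MIST_WEBHOOK_TYPES.values() for e in evs}
-- )
--
-- def validate_mist_webhook_type(webhook_type: str) -> Tuple[bool, Optional[str]]:
--     if not webhook_type: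
--         return False, "Webhook type is required"
--     lo, hi = 0, len(_SORTED_TOKENS)
--     while lo < hi:
--         mid = (lo + hi) // 2
--         if _SORTED_TOKENS[mid] < webhook_type:
--             lo = mid + 1
--         else:
--             hi = mid
--     if lo < len(_SORTED_TOKENS) and _SORTED_TOKENS[lo] == webhook_type:
--         return True, None
--     return False, f"Invalid Mist webhook type: {webhook_type}"
-- ===== Notes on version B (the rewrite author's own statement) =====
-- stated objective: alternative
-- what changed: Replaced A's two-stage linear scan (dict-key membership, then a loop over each category's event list) with a hand-written binary search over one flat sorted tuple of all valid tokens built at module load.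
import Mathlib
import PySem

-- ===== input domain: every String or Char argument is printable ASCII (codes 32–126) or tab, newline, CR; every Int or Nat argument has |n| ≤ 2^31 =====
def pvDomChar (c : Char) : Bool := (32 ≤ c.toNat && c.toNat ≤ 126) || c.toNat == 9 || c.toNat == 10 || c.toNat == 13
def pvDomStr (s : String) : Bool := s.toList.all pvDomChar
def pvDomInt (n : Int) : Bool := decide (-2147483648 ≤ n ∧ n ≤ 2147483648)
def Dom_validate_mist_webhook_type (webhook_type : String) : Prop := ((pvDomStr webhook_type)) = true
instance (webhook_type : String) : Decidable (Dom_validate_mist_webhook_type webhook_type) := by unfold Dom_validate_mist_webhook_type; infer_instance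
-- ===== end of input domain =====

-- B replaces A's two-stage linear scan (dict-key check + loop over event lists) by a
-- hand-written binary search over one flat sorted list of all valid tokens (objective: alternative).


-- ===== PORT A =====
-- Module constant MIST_WEBHOOK_TYPES (dict, insertion order).
def mistWebhookTypes : PySem.Dict String (List String) :=
  PySem.Dict.mk
  [ ("alarm",
      ["ap_offline", "ap_online", "switch_offline", "switch_online",
       "gateway_offline", "gateway_online", "ap_restarted", "switch_restarted",
       "gateway_restarted", "ap_configured", "switch_configured",
       "gateway_configured", "ap_disconnected", "switch_disconnected",
       "gateway_disconnected"]),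
    ("audit",
      ["config_changed", "site_config_changed", "org_config_changed",
       "device_config_changed", "wlan_config_changed", "network_config_changed"]),
    ("device-events",
      ["device_claimed", "device_unclaimed", "device_assigned",
       "device_unassigned", "device_upgraded"]),
    ("client-join", ["client_connected", "client_disconnected"]),
    ("zone", ["zone_entered", "zone_exited"]),
    ("asset-raw", ["asset_detected"]) ]

-- A's 'for category, events in MIST_WEBHOOK_TYPES.items(): if webhook_type in events: return True, None'
def eventLoopA (items : List (String × List String)) (s : String) : Bool :=
  match items with
  | [] => false
  | (_, events) :: rest => if events.contains s then true else eventLoopA rest s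

def validate_mist_webhook_type (webhook_type : String) : Bool × Option String :=
  if webhook_type == "" then (false, some "Webhook type is required")
  else if PySem.Dict.contains mistWebhookTypes webhook_type then (true, none)
  else if eventLoopA mistWebhookTypes.items webhook_type then (true, none)
  else (false, some ("Invalid Mist webhook type: " ++ webhook_type))

-- ===== PORT B =====
-- _SORTED_TOKENS = sorted(set(MIST_WEBHOOK_TYPES) | {e for evs in ... for e in evs})
def validTokensSet : PySem.Set String :=
  PySem.Set.union (PySem.Set.ofList (PySem.Dict.keys mistWebhookTypes))
    (PySem.Set.ofList ((mistWebhookTypes.items.map Prod.snd).flatten))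

def sortedTokens : List String :=
  PySem.List.sorted validTokensSet (fun x => x) false

-- the 'while lo < hi' binary-search loop of B (indices always in range; getD is exact here)
def bsearchB (s : String) (lo hi : Nat) : Nat :=
  if _h : lo < hi then
    let mid := (lo + hi) / 2
    if sortedTokens.getD mid "" < s then bsearchB s (mid + 1) hi
    else bsearchB s lo mid
  else lo
termination_by hi - lo
decreasing_by all_goals omega

def validate_mist_webhook_type_alt (webhook_type : String) : Bool × Option String :=
  if webhook_type == "" then (false, some "Webhook type is required")
  else
    let i := bsearchB webhook_type 0 sortedTokens.length
    if i < sortedTokens.length ∧ sortedTokens.getD i "" = webhook_type then (true, none)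
    else (false, some ("Invalid Mist webhook type: " ++ webhook_type))

-- ===== PRECONDITION & SPEC =====
def Spec_validate_mist_webhook_type (webhook_type : String) (out : Bool × Option String) : Prop := out = validate_mist_webhook_type_alt webhook_type
instance (webhook_type : String) (out : Bool × Option String) : Decidable (Spec_validate_mist_webhook_type webhook_type out) := by unfold Spec_validate_mist_webhook_type; infer_instance

-- ===== CLAIM (what is proved, stated in full; the proofs are below) =====
def Claim_equal_validate_mist_webhook_type : Prop := ∀ (webhook_type : String), Dom_validate_mist_webhook_type webhook_type → Spec_validate_mist_webhook_type webhook_type (validate_mist_webhook_type webhook_type)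

-- ===== LEMMAS AND PROOFS =====
-- The sorted flat token list, as a literal.
def tokLit : List String :=
  ["alarm", "ap_configured", "ap_disconnected", "ap_offline", "ap_online",
   "ap_restarted", "asset-raw", "asset_detected", "audit", "client-join",
   "client_connected", "client_disconnected", "config_changed", "device-events",
   "device_assigned", "device_claimed", "device_config_changed", "device_unassigned",
   "device_unclaimed", "device_upgraded", "gateway_configured", "gateway_disconnected",
   "gateway_offline", "gateway_online", "gateway_restarted", "network_config_changed",
   "org_config_changed", "site_config_changed", "switch_configured",
   "switch_disconnected", "switch_offline", "switch_online", "switch_restarted",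
   "wlan_config_changed", "zone", "zone_entered", "zone_exited"]

theorem tokLit_perm : tokLit.Perm validTokensSet := by decide

theorem tokLit_pairwise : tokLit.Pairwise (· < ·) := by
  have h : tokLit.Pairwise (fun a b => a.toList < b.toList) := by decide
  exact h.imp (fun hab => String.lt_iff_toList_lt.mpr hab)

theorem sortedTokens_eq : sortedTokens = tokLit :=
  PySem.List.sorted_eq_of_perm_of_pairwise_lt validTokensSet tokLit (fun x => x) tokLit_perm tokLit_pairwise

theorem tok_strict_mono (i j : Nat) (hij : i < j) (hj : j < sortedTokens.length) :
    sortedTokens.getD i "" < sortedTokens.getD j "" := by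
  have hp := tokLit_pairwise
  rw [List.pairwise_iff_getElem] at hp
  rw [sortedTokens_eq] at hj ⊢
  rw [List.getD_eq_getElem _ _ (lt_trans hij hj), List.getD_eq_getElem _ _ hj]
  exact hp i j (lt_trans hij hj) hj hij

-- loop invariant of the binary search: it keeps everything below lo < s and everything from hi on ≥ s
theorem bsearchB_inv (s : String) :
    ∀ k lo hi, hi - lo = k → hi ≤ sortedTokens.length →
      (∀ j, j < lo → sortedTokens.getD j "" < s) →
      (∀ j, hi ≤ j → j < sortedTokens.length → s ≤ sortedTokens.getD j "") →
      (∀ j, j < bsearchB s lo hi → sortedTokens.getD j "" < s) ∧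
      (∀ j, bsearchB s lo hi ≤ j → j < sortedTokens.length → s ≤ sortedTokens.getD j "") := by
  intro k
  induction k using Nat.strong_induction_on with
  | _ k ih =>
    intro lo hi hk hhi hlow hhigh
    rw [bsearchB]
    by_cases h : lo < hi
    · simp only [h, dif_pos]
      by_cases hc : sortedTokens.getD ((lo + hi) / 2) "" < s
      · simp only [hc, if_pos]
        refine ih (hi - ((lo + hi) / 2 + 1)) (by omega) _ _ rfl hhi ?_ hhigh
        intro j hj
        rcases Nat.lt_or_ge j ((lo + hi) / 2) with hj' | hj'
        · exact lt_trans (tok_strict_mono j _ hj' (by omega)) hc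
        · have : j = (lo + hi) / 2 := by omega
          rwa [this]
      · simp only [hc, if_neg, not_false_iff]
        refine ih ((lo + hi) / 2 - lo) (by omega) _ _ rfl (by omega) hlow ?_
        intro j hj hjn
        rcases Nat.lt_or_ge ((lo + hi) / 2) j with hj' | hj'
        · have hmid : ¬ sortedTokens.getD ((lo + hi) / 2) "" < s := hc
          exact le_trans (not_lt.mp hmid) (le_of_lt (tok_strict_mono _ j hj' hjn))
        · have : j = (lo + hi) / 2 := by omega
          rw [this]; exact not_lt.mp hc
    · simp only [h, dif_neg, not_false_iff]
      have : lo = hi ∨ hi < lo := by omega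
      constructor
      · intro j hj; exact hlow j hj
      · intro j hj hjn
        rcases this with h1 | h1
        · exact hhigh j (h1 ▸ hj) hjn
        · exact hhigh j (by omega) hjn

-- the test B performs after the loop succeeds iff s is in the token list
theorem bfind_iff (s : String) :
    (bsearchB s 0 sortedTokens.length < sortedTokens.length ∧
      sortedTokens.getD (bsearchB s 0 sortedTokens.length) "" = s) ↔ s ∈ sortedTokens := by
  obtain ⟨hlt, hge⟩ := bsearchB_inv s sortedTokens.length 0 sortedTokens.length rfl le_rfl
    (by intro j hj; omega) (by intro j hj hjn; omega)
  set i := bsearchB s 0 sortedTokens.length with hi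
  constructor
  · rintro ⟨h1, h2⟩
    rw [← h2, List.getD_eq_getElem _ _ h1]
    exact List.getElem_mem h1
  · intro hmem
    obtain ⟨j, hj, hjs⟩ := List.mem_iff_getElem.mp hmem
    have hjd : sortedTokens.getD j "" = s := by rw [List.getD_eq_getElem _ _ hj]; exact hjs
    have hji : ¬ j < i := by
      intro h; have := hlt j h; rw [hjd] at this; exact lt_irrefl s this
    have hij : i ≤ j := by omega
    rcases Nat.lt_or_ge i j with h' | h'
    · exfalso
      have h1 := hge i (le_refl i) (by omega)
      have h2 := tok_strict_mono i j h' hj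
      rw [hjd] at h2
      exact absurd (lt_of_le_of_lt h1 h2) (lt_irrefl s)
    · have : i = j := by omega
      exact ⟨this ▸ hj, this ▸ hjd⟩

-- A's event loop finds s iff s is in the concatenation of all event lists.
theorem eventLoopA_eq_contains_flatten (items : List (String × List String)) (s : String) :
    eventLoopA items s = ((items.map Prod.snd).flatten).contains s := by
  induction items with
  | nil => rfl
  | cons hd tl ih =>
    cases hd with
    | mk k evs =>
      simp [eventLoopA, ih]
      by_cases h : evs.contains s <;> simp_all

-- All tokens are distinct, so the set union is literally keys ++ flattened events.
theorem validTokensSet_eq :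
    validTokensSet = PySem.Dict.keys mistWebhookTypes ++ (mistWebhookTypes.items.map Prod.snd).flatten := by
  decide

theorem mem_sortedTokens (s : String) :
    (s ∈ sortedTokens) ↔
      (PySem.Dict.contains mistWebhookTypes s || eventLoopA mistWebhookTypes.items s) = true := by
  rw [eventLoopA_eq_contains_flatten, sortedTokens_eq, tokLit_perm.mem_iff, validTokensSet_eq,
    PySem.Dict.contains_eq_decide_mem_keys]
  by_cases h1 : s ∈ mistWebhookTypes.keys <;>
    by_cases h2 : s ∈ (List.map Prod.snd mistWebhookTypes.items).flatten <;>
      simp [List.mem_append, h1, h2]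

-- ===== VERDICT (by name: the statement is the Claim_ definition above) =====
theorem validate_mist_webhook_type_spec : Claim_equal_validate_mist_webhook_type := by
  intro s _
  unfold Spec_validate_mist_webhook_type validate_mist_webhook_type validate_mist_webhook_type_alt
  by_cases h0 : s == ""
  · simp [h0]
  · simp only [h0, if_neg, Bool.not_eq_true]
    by_cases hmem : s ∈ sortedTokens
    · have hb := (bfind_iff s).mpr hmem
      have ha := (mem_sortedTokens s).mp hmem
      obtain ⟨h1, h2⟩ := hb
      rw [List.getD_eq_getElem _ _ h1] at h2
      rcases Bool.or_eq_true_iff.mp ha with hk | he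
      · simp [hk, h1, h2]
      · simp [he, h1, h2]
    · have hb : ¬ (bsearchB s 0 sortedTokens.length < sortedTokens.length ∧
          sortedTokens.getD (bsearchB s 0 sortedTokens.length) "" = s) :=
          fun h => hmem ((bfind_iff s).mp h)
      have ha : (PySem.Dict.contains mistWebhookTypes s || eventLoopA mistWebhookTypes.items s) = false := by
        by_contra h
        exact hmem ((mem_sortedTokens s).mpr (Bool.of_not_eq_false h))
      have hk : PySem.Dict.contains mistWebhookTypes s = false := by
        cases hx : PySem.Dict.contains mistWebhookTypes s <;> simp_all
      have he : eventLoopA mistWebhookTypes.items s = false := by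
        cases hx : eventLoopA mistWebhookTypes.items s <;> simp_all
      simp only [hk, he, Bool.false_eq_true, if_false]
      exact (if_neg hb).symm
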